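-- pv_equiv track=rewrite | github.com/purvanshh/Task-Scheduler-Purvansh-Sahu-10169 | src/scheduler.py | _find_cycle_nodes_tarjan
-- ===== SOURCE A (Python) =====
-- def _find_cycle_nodes_tarjan(all_nodes, graph, node_set):
--     """Iterative Tarjan's SCC — return nodes in SCCs of size > 1, or
--     single-node SCCs that have a self-loop."""
--     idx_counter = 0
--     index = {}
--     low = {}
--     on_stack = set()
--     stack = []
--     result = set()
--
--     self_loops = set()
--     for v in all_nodes:
--         if v in graph.get(v, set()):
--             self_loops.add(v)
--
--     ENTER, PROCESS_CHILD, FINISH = 0, 1, 2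
--
--     for root in all_nodes:
--         if root in index:
--             continue
--         call_stack = [(ENTER, root, None, iter(sorted(graph.get(root, []))))]
--
--         while call_stack:
--             action, v, child, children = call_stack[-1]
--
--             if action == ENTER:
--                 index[v] = low[v] = idx_counter
--                 idx_counter += 1
--                 stack.append(v)
--                 on_stack.add(v)
--                 call_stack[-1] = (PROCESS_CHILD, v, None, children)
--
--             elif action == PROCESS_CHILD:
--                 if child is not None:
--                     low[v] = min(low[v], low[child])
--
--                 found_next = False
--                 for w in children:
--                     if w not in node_set:
--                         continue
--                     if w not in index:
--                         call_stack[-1] = (PROCESS_CHILD, v, w, children)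
--                         call_stack.append((ENTER, w, None, iter(sorted(graph.get(w, [])))))
--                         found_next = True
--                         break
--                     elif w in on_stack:
--                         low[v] = min(low[v], index[w])
--
--                 if not found_next:
--                     call_stack[-1] = (FINISH, v, None, None)
--
--             elif action == FINISH:
--                 if low[v] == index[v]:
--                     scc = []
--                     while True:
--                         w = stack.pop()
--                         on_stack.discard(w)
--                         scc.append(w)
--                         if w == v:
--                             break
--                     if len(scc) > 1:
--                         result.update(scc)
--                     elif len(scc) == 1 and scc[0] in self_loops:
--                         result.add(scc[0])
--                 call_stack.pop()
--
--     return result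
-- ===== SOURCE B (Python) =====
-- def _find_cycle_nodes_tarjan(all_nodes, graph, node_set):
--     """Tarjan's SCC by direct recursion (the explicit ENTER/PROCESS/FINISH
--     action-stack state machine disappears); same result set."""
--     self_loops = {v for v in all_nodes if v in graph.get(v, set())}
--     index = {}
--     low = {}
--     stack = []
--     on_stack = set()
--     result = set()
--     counter = [0]
--
--     def strongconnect(v):
--         index[v] = low[v] = counter[0]
--         counter[0] += 1
--         stack.append(v)
--         on_stack.add(v)
--         for w in sorted(graph.get(v, [])):
--             if w not in node_set:
--                 continue
--             if w not in index:
--                 strongconnect(w)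
--                 low[v] = min(low[v], low[w])
--             elif w in on_stack:
--                 low[v] = min(low[v], index[w])
--         if low[v] == index[v]:
--             scc = []
--             while True:
--                 w = stack.pop()
--                 on_stack.discard(w)
--                 scc.append(w)
--                 if w == v:
--                     break
--             if len(scc) > 1:
--                 result.update(scc)
--             elif scc[0] in self_loops:
--                 result.add(scc[0])
--
--     for root in all_nodes:
--         if root not in index:
--             strongconnect(root)
--     return result
-- ===== Notes on version B (the rewrite author's own statement) =====
-- stated objective: simpler
-- what changed: A's hand-defunctionalized ENTER/PROCESS_CHILD/FINISH action-stack state machine is replaced by a direct recursive strongconnect (and the self-loop scan by a set comprehension): same Tarjan state, but the explicit frame juggling disappears and the code is about half as long.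
import Mathlib
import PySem

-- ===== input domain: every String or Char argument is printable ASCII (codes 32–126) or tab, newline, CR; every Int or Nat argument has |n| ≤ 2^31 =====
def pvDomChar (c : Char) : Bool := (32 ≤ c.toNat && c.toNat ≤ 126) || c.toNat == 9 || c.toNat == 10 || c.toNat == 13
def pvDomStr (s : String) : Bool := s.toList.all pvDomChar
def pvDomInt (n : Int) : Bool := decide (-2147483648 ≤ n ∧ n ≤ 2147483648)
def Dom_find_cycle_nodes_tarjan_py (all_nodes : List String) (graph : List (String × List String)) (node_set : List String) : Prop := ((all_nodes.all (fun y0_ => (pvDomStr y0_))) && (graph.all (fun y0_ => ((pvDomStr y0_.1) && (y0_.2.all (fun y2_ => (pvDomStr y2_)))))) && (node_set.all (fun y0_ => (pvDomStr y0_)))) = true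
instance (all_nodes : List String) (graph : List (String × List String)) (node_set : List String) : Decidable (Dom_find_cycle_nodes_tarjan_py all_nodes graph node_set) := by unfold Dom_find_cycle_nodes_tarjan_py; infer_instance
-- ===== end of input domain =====

-- B replaces A's hand-rolled ENTER/PROCESS_CHILD/FINISH action-stack state machine by direct
-- recursion (objective: simpler); both compute the same Tarjan state step for step, so the
-- returned set is identical.  The Python return value is a set; both ports return its elements
-- in first-insertion order (identical on both sides).

-- ===== PORT A =====
-- Shared Tarjan state (A and B use the identical mutable variables idx_counter/index/low/on_stack/stack/result).
structure PvSt where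
  ctr : Int
  index : PySem.Dict String Int
  low : PySem.Dict String Int
  onStack : PySem.Set String
  stack : List String
  result : PySem.Set String

-- sorted(graph.get(v, [])) — both Pythons contain this expression verbatim
def pvChildren (graph : List (String × List String)) (v : String) : List String :=
  PySem.List.sorted ((PySem.Dict.mk graph).getD v []) (fun x => x) false

-- index[v] = low[v] = idx_counter; idx_counter += 1; stack.append(v); on_stack.add(v)  (identical in A and B)
def pvEnter (v : String) (st : PvSt) : PvSt :=
  { st with index := st.index.insert v st.ctr
          , low := st.low.insert v st.ctr
          , ctr := st.ctr + 1
          , stack := st.stack ++ [v]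
          , onStack := PySem.Set.add st.onStack v }

-- low[v] = min(low[v], low[w])  (identical in A and B)
def pvAfterChild (v w : String) (st : PvSt) : PvSt :=
  { st with low := st.low.insert v (min (st.low.getD v 0) (st.low.getD w 0)) }

-- low[v] = min(low[v], index[w])  (identical in A and B)
def pvLowIdx (v w : String) (st : PvSt) : PvSt :=
  { st with low := st.low.insert v (min (st.low.getD v 0) (st.index.getD w 0)) }

-- A's PROCESS_CHILD preamble: 'if child is not None: low[v] = min(low[v], low[child])'
def pvApplyC (v : String) (c : Option String) (st : PvSt) : PvSt :=
  match c with
  | none => st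
  | some w => pvAfterChild v w st

-- the 'while True: w = stack.pop(); on_stack.discard(w); scc.append(w); if w == v: break' loop,
-- on the reversed stack (top first); identical in A and B.  If v is not on the stack Python
-- raises IndexError on the empty pop — unreachable; the port then just consumes the stack.
def pvPopRev (v : String) : List String → PySem.Set String → List String → List String × PySem.Set String × List String
  | [], os, scc => ([], os, scc)
  | w :: rest, os, scc =>
      if w = v then (rest, PySem.Set.discard os w, scc ++ [w])
      else pvPopRev v rest (PySem.Set.discard os w) (scc ++ [w])

-- the 'if low[v] == index[v]: pop an SCC and record it' block; textually identical in A and B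
-- (B writes 'elif scc[0] in self_loops' for a provably nonempty scc; the length-1 guard only
-- totalizes the unreachable empty-scc case where Python would raise).
def pvFinish (sl : PySem.Set String) (v : String) (st : PvSt) : PvSt :=
  if st.low.getD v 0 = st.index.getD v 0 then
    let t := pvPopRev v st.stack.reverse st.onStack []
    let scc := t.2.2
    let result' :=
      if 1 < scc.length then scc.foldl PySem.Set.add st.result
      else if scc.length = 1 ∧ PySem.Set.contains sl (scc.headD "") then PySem.Set.add st.result (scc.headD "")
      else st.result
    { st with stack := t.1.reverse, onStack := t.2.1, result := result' }
  else st

-- A's inner 'for w in children' scan: skip children not in node_set, stop at the first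
-- unindexed child (returning it and the remaining iterator), update low for on-stack ones.
def pvScan (node_set : List String) (v : String) : List String → PvSt → PvSt × Option (String × List String)
  | [], st => (st, none)
  | w :: ws, st =>
      if ¬ node_set.contains w then pvScan node_set v ws st
      else if ¬ st.index.contains w then (st, some (w, ws))
      else if PySem.Set.contains st.onStack w then pvScan node_set v ws (pvLowIdx v w st)
      else pvScan node_set v ws st

-- A's 'while call_stack' loop over explicit (action, v, child, children) frames
-- (ENTER=0, PROCESS_CHILD=1, FINISH=2).  The Nat fuel only totalizes the recursion;
-- it is proved sufficient below (pv_runA_of_sconnect / find_cycle_nodes_tarjan_py_spec).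
def pvRunA (graph : List (String × List String)) (node_set : List String) (sl : PySem.Set String) :
    Nat → List (Nat × String × Option String × List String) → PvSt → Option PvSt
  | _, [], st => some st
  | 0, _ :: _, _ => none
  | f+1, (a, v, c, ws) :: rest, st =>
      if a = 0 then
        pvRunA graph node_set sl f ((1, v, none, ws) :: rest) (pvEnter v st)
      else if a = 1 then
        match pvScan node_set v ws (pvApplyC v c st) with
        | (st2, none) => pvRunA graph node_set sl f ((2, v, none, ([] : List String)) :: rest) st2
        | (st2, some (w, ws')) =>
            pvRunA graph node_set sl f
              ((0, w, none, pvChildren graph w) :: (1, v, some w, ws') :: rest) st2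
      else
        pvRunA graph node_set sl f rest (pvFinish sl v st)

def find_cycle_nodes_tarjan_py (all_nodes : List String) (graph : List (String × List String)) (node_set : List String) : List String :=
  -- self_loops: explicit for-loop over all_nodes
  let sl := all_nodes.foldl
      (fun s v => if ((PySem.Dict.mk graph).getD v []).contains v then PySem.Set.add s v else s)
      PySem.Set.empty
  let fuel := 4 * (PySem.List.dedup (all_nodes ++ node_set)).length + 4
  let st0 : PvSt := ⟨0, PySem.Dict.empty, PySem.Dict.empty, PySem.Set.empty, [], PySem.Set.empty⟩
  let stF := all_nodes.foldl (fun st root =>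
      if st.index.contains root then st
      else match pvRunA graph node_set sl fuel [(0, root, none, pvChildren graph root)] st with
           | some st' => st'
           | none => st) st0
  stF.result

-- ===== PORT B =====
-- B: the same Tarjan state, but strongconnect is a direct recursive function
-- (fuel totalizes the recursion; proved sufficient in pv_sconnect_total).
mutual
def pvSconnect (graph : List (String × List String)) (node_set : List String) (sl : PySem.Set String) :
    Nat → String → PvSt → Option PvSt
  | 0, _, _ => none
  | f+1, v, st =>
      match pvLoop graph node_set sl f v (pvChildren graph v) (pvEnter v st) with
      | none => none
      | some st2 => some (pvFinish sl v st2)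
  termination_by f _ _ => (f, 0, 0)

-- 'for w in sorted(graph.get(v, [])): …' inside strongconnect
def pvLoop (graph : List (String × List String)) (node_set : List String) (sl : PySem.Set String) :
    Nat → String → List String → PvSt → Option PvSt
  | _, _, [], st => some st
  | f, v, w :: ws, st =>
      if ¬ node_set.contains w then pvLoop graph node_set sl f v ws st
      else if ¬ st.index.contains w then
        match pvSconnect graph node_set sl f w st with
        | none => none
        | some st' => pvLoop graph node_set sl f v ws (pvAfterChild v w st')
      else if PySem.Set.contains st.onStack w then pvLoop graph node_set sl f v ws (pvLowIdx v w st)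
      else pvLoop graph node_set sl f v ws st
  termination_by f _ ws _ => (f, 1, ws.length)
end

def find_cycle_nodes_tarjan_py_alt (all_nodes : List String) (graph : List (String × List String)) (node_set : List String) : List String :=
  -- self_loops: set comprehension
  let sl := PySem.Set.ofList (all_nodes.filter (fun v => ((PySem.Dict.mk graph).getD v []).contains v))
  let fuel := (PySem.List.dedup (all_nodes ++ node_set)).length + 1
  let st0 : PvSt := ⟨0, PySem.Dict.empty, PySem.Dict.empty, PySem.Set.empty, [], PySem.Set.empty⟩
  let stF := all_nodes.foldl (fun st root =>
      if st.index.contains root then st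
      else match pvSconnect graph node_set sl fuel root st with
           | some st' => st'
           | none => st) st0
  stF.result

-- ===== PRECONDITION & SPEC =====
def Spec_find_cycle_nodes_tarjan_py (all_nodes : List String) (graph : List (String × List String)) (node_set : List String) (out : List String) : Prop := out = find_cycle_nodes_tarjan_py_alt all_nodes graph node_set
instance (all_nodes : List String) (graph : List (String × List String)) (node_set : List String) (out : List String) : Decidable (Spec_find_cycle_nodes_tarjan_py all_nodes graph node_set out) := by unfold Spec_find_cycle_nodes_tarjan_py; infer_instance

-- ===== CLAIM (what is proved, stated in full; the proofs are below) =====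
def Claim_equal_find_cycle_nodes_tarjan_py : Prop := ∀ (all_nodes : List String) (graph : List (String × List String)) (node_set : List String), Dom_find_cycle_nodes_tarjan_py all_nodes graph node_set → Spec_find_cycle_nodes_tarjan_py all_nodes graph node_set (find_cycle_nodes_tarjan_py all_nodes graph node_set)

-- ===== LEMMAS AND PROOFS =====

-- number of candidate vertices (cand) not yet indexed: the fuel/step potential
def pvBc (cand : List String) (st : PvSt) : Nat :=
  (cand.filter (fun x => !(st.index.contains x))).length

-- ---- trivial state-component facts ----
theorem pv_index_afterChild (v w : String) (st : PvSt) : (pvAfterChild v w st).index = st.index := rfl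
theorem pv_index_lowIdx (v w : String) (st : PvSt) : (pvLowIdx v w st).index = st.index := rfl
theorem pv_index_finish (sl : PySem.Set String) (v : String) (st : PvSt) : (pvFinish sl v st).index = st.index := by
  unfold pvFinish; split <;> rfl

theorem pv_index_scan (node_set : List String) (v : String) (ws : List String) (st : PvSt) :
    (pvScan node_set v ws st).1.index = st.index := by
  induction ws generalizing st with
  | nil => rfl
  | cons w ws ih =>
      unfold pvScan
      split_ifs with h1 h2 h3 <;> first | rfl | exact ih _

-- ---- filter/counting facts ----
theorem pv_filt_insert (l : List String) (hn : l.Nodup) (v : String) (hv : v ∈ l)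
    (d : PySem.Dict String Int) (hvd : d.contains v = false) (c : Int) :
    (l.filter (fun x => !((d.insert v c).contains x))).length + 1
      = (l.filter (fun x => !(d.contains x))).length := by
  induction l with
  | nil => simp at hv
  | cons a l ih =>
      rw [List.nodup_cons] at hn
      rw [List.filter_cons, List.filter_cons]
      rcases List.mem_cons.mp hv with rfl | hvl
      · have hcong : l.filter (fun x => !((d.insert v c).contains x))
            = l.filter (fun x => !(d.contains x)) := by
          apply List.filter_congr
          intro x hx
          have hxv : (x == v) = false := by
            simp only [beq_eq_false_iff_ne]
            rintro rfl; exact hn.1 hx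
          simp [PySem.Dict.contains_insert, hxv]
        have c1 : ((d.insert v c).contains v) = true := by
          simp
        simp only [c1, hvd, Bool.not_true, Bool.not_false, Bool.false_eq_true, if_false, if_true,
          hcong, List.length_cons]
      · have hav : (a == v) = false := by
          simp only [beq_eq_false_iff_ne]
          rintro rfl; exact hn.1 hvl
        by_cases hda : d.contains a = true
        · have c1 : ((d.insert v c).contains a) = true := by
            simp [PySem.Dict.contains_insert, hda]
          simp only [c1, hda, Bool.not_true]
          simp only [Bool.false_eq_true, if_false]
          exact ih hn.2 hvl
        · have hda0 : d.contains a = false := by simpa using hda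
          have c1 : ((d.insert v c).contains a) = false := by
            simp [PySem.Dict.contains_insert, hav, hda0]
          simp only [c1, hda0, Bool.not_false, if_true, List.length_cons]
          have := ih hn.2 hvl; omega

theorem pv_filt_mono (l : List String) (d d' : PySem.Dict String Int)
    (h : ∀ x, d.contains x = true → d'.contains x = true) :
    (l.filter (fun x => !(d'.contains x))).length ≤ (l.filter (fun x => !(d.contains x))).length := by
  induction l with
  | nil => simp
  | cons a l ih =>
      rw [List.filter_cons, List.filter_cons]
      by_cases hda : d.contains a = true
      · have hda' := h a hda
        simp only [hda, hda', Bool.not_true, Bool.false_eq_true, if_false]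
        exact ih
      · have hda0 : d.contains a = false := by simpa using hda
        by_cases hda' : d'.contains a = true
        · simp only [hda0, hda', Bool.not_true, Bool.not_false, Bool.false_eq_true, if_false,
            if_true, List.length_cons]
          omega
        · have hda0' : d'.contains a = false := by simpa using hda'
          simp only [hda0, hda0', Bool.not_false, if_true, List.length_cons]
          omega

theorem pv_filt_strict (l : List String) (hn : l.Nodup) (w : String) (hw : w ∈ l)
    (d d' : PySem.Dict String Int) (h : ∀ x, d.contains x = true → d'.contains x = true)
    (hwd : d.contains w = false) (hwd' : d'.contains w = true) :
    (l.filter (fun x => !(d'.contains x))).length + 1 ≤ (l.filter (fun x => !(d.contains x))).length := by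
  induction l with
  | nil => simp at hw
  | cons a l ih =>
      rw [List.nodup_cons] at hn
      rw [List.filter_cons, List.filter_cons]
      rcases List.mem_cons.mp hw with rfl | hwl
      · simp only [hwd, hwd', Bool.not_true, Bool.not_false, Bool.false_eq_true, if_false,
          if_true, List.length_cons]
        have := pv_filt_mono l d d' h
        omega
      · by_cases hda : d.contains a = true
        · have hda' := h a hda
          simp only [hda, hda', Bool.not_true, Bool.false_eq_true, if_false]
          exact ih hn.2 hwl
        · have hda0 : d.contains a = false := by simpa using hda
          by_cases hda' : d'.contains a = true
          · simp only [hda0, hda', Bool.not_true, Bool.not_false, Bool.false_eq_true, if_false,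
              if_true, List.length_cons]
            have := ih hn.2 hwl; omega
          · have hda0' : d'.contains a = false := by simpa using hda'
            simp only [hda0, hda0', Bool.not_false, if_true, List.length_cons]
            have := ih hn.2 hwl; omega

-- ---- index keys only grow through B's recursion ----
theorem pv_contains_enter (v x : String) (st : PvSt) :
    (pvEnter v st).index.contains x = ((x == v) || st.index.contains x) := by
  simp [pvEnter, PySem.Dict.contains_insert]

theorem pv_kg_loop (graph : List (String × List String)) (node_set : List String) (sl : PySem.Set String) (f : Nat)
    (hs : ∀ v st st', pvSconnect graph node_set sl f v st = some st' →
        (∀ x, st.index.contains x = true → st'.index.contains x = true) ∧ st'.index.contains v = true)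
    (ws : List String) :
    ∀ v st st', pvLoop graph node_set sl f v ws st = some st' →
        ∀ x, st.index.contains x = true → st'.index.contains x = true := by
  induction ws with
  | nil =>
      intro v st st' h x hx
      rw [pvLoop] at h
      cases h; exact hx
  | cons w ws ih =>
      intro v st st' h x hx
      rw [pvLoop] at h
      split_ifs at h with h1 h2 h3
      · exact ih v _ st' h x (by rw [pv_index_lowIdx]; exact hx)
      · exact ih v st st' h x hx
      · cases hsc : pvSconnect graph node_set sl f w st with
        | none => rw [hsc] at h; cases h
        | some stW =>
            rw [hsc] at h
            obtain ⟨mono, hw⟩ := hs w st stW hsc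
            have hx2 : (pvAfterChild v w stW).index.contains x = true := by
              rw [pv_index_afterChild]; exact mono x hx
            exact ih v _ st' h x hx2
      · exact ih v st st' h x hx

theorem pv_kg (graph : List (String × List String)) (node_set : List String) (sl : PySem.Set String) : ∀ (f : Nat),
    (∀ v st st', pvSconnect graph node_set sl f v st = some st' →
        (∀ x, st.index.contains x = true → st'.index.contains x = true) ∧ st'.index.contains v = true) := by
  intro f
  induction f with
  | zero => intro v st st' h; rw [pvSconnect] at h; cases h
  | succ f ih =>
      intro v st st' h
      rw [pvSconnect] at h
      cases hl : pvLoop graph node_set sl f v (pvChildren graph v) (pvEnter v st) with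
      | none => rw [hl] at h; cases h
      | some st2 =>
          rw [hl] at h
          have hst' : st' = pvFinish sl v st2 := by cases h; rfl
          have hidx : st'.index = st2.index := by rw [hst', pv_index_finish]
          have hmono := pv_kg_loop graph node_set sl f ih (pvChildren graph v) v (pvEnter v st) st2 hl
          constructor
          · intro x hx
            rw [hidx]
            exact hmono x (by rw [pv_contains_enter, hx, Bool.or_true])
          · rw [hidx]
            exact hmono v (by rw [pv_contains_enter]; simp)

-- ---- B terminates within fuel 1 + pvBc ----
theorem pv_Bc_enter (cand : List String) (hnd : cand.Nodup) (v : String) (hv : v ∈ cand)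
    (st : PvSt) (hc : st.index.contains v = false) :
    pvBc cand (pvEnter v st) + 1 = pvBc cand st :=
  pv_filt_insert cand hnd v hv st.index hc st.ctr

theorem pv_tb_loop (graph : List (String × List String)) (node_set : List String) (sl : PySem.Set String)
    (cand : List String) (hnd : cand.Nodup) (hns : ∀ w, node_set.contains w = true → w ∈ cand) (f : Nat)
    (hs : ∀ v st, v ∈ cand → st.index.contains v = false → 1 + pvBc cand st ≤ f →
        ∃ st', pvSconnect graph node_set sl f v st = some st')
    (ws : List String) :
    ∀ v st, 1 + pvBc cand st ≤ f → ∃ st', pvLoop graph node_set sl f v ws st = some st' := by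
  induction ws with
  | nil => intro v st _; exact ⟨st, by rw [pvLoop]⟩
  | cons w ws ih =>
      intro v st hfuel
      rw [pvLoop]
      split_ifs with h1 h2 h3
      · have hB : pvBc cand (pvLowIdx v w st) = pvBc cand st := rfl
        exact ih v (pvLowIdx v w st) (by omega)
      · exact ih v st hfuel
      · have hw2 : st.index.contains w = false := by
          simpa using h2
        have hwc : w ∈ cand := hns w (by simpa using h1)
        obtain ⟨stW, hsc⟩ := hs w st hwc hw2 hfuel
        obtain ⟨mono, hwW⟩ := pv_kg graph node_set sl f w st stW hsc
        have hdec : pvBc cand stW + 1 ≤ pvBc cand st :=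
          pv_filt_strict cand hnd w hwc st.index stW.index mono hw2 hwW
        have hB : pvBc cand (pvAfterChild v w stW) = pvBc cand stW := rfl
        obtain ⟨st', hl⟩ := ih v (pvAfterChild v w stW) (by omega)
        exact ⟨st', by rw [hsc]; exact hl⟩
      · exact ih v st hfuel

theorem pv_tb (graph : List (String × List String)) (node_set : List String) (sl : PySem.Set String)
    (cand : List String) (hnd : cand.Nodup) (hns : ∀ w, node_set.contains w = true → w ∈ cand) : ∀ (f : Nat),
    ∀ v st, v ∈ cand → st.index.contains v = false → 1 + pvBc cand st ≤ f →
        ∃ st', pvSconnect graph node_set sl f v st = some st' := by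
  intro f
  induction f with
  | zero => intro v st _ _ hfuel; omega
  | succ f ih =>
      intro v st hv hc hfuel
      have hBe := pv_Bc_enter cand hnd v hv st hc
      obtain ⟨st2, hl⟩ := pv_tb_loop graph node_set sl cand hnd hns f ih (pvChildren graph v) v
        (pvEnter v st) (by omega)
      exact ⟨pvFinish sl v st2, by rw [pvSconnect, hl]⟩

-- ---- A's scan against B's loop ----
theorem pv_scan_loop (graph : List (String × List String)) (node_set : List String) (sl : PySem.Set String)
    (f : Nat) (v : String) : ∀ (ws : List String) (st : PvSt),
    (∀ st2, pvScan node_set v ws st = (st2, none) → pvLoop graph node_set sl f v ws st = some st2)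
    ∧ (∀ st2 w ws', pvScan node_set v ws st = (st2, some (w, ws')) →
        node_set.contains w = true ∧ st2.index.contains w = false ∧ ws'.length < ws.length ∧
        pvLoop graph node_set sl f v ws st =
          (match pvSconnect graph node_set sl f w st2 with
           | none => none
           | some st' => pvLoop graph node_set sl f v ws' (pvAfterChild v w st'))) := by
  intro ws
  induction ws with
  | nil =>
      intro st
      refine ⟨?_, ?_⟩
      · intro st2 h
        rw [pvScan] at h
        cases h
        rw [pvLoop]
      · intro st2 w ws' h
        rw [pvScan] at h
        cases h
  | cons w0 ws ih =>
      intro st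
      constructor
      · intro st2 h
        rw [pvScan] at h
        rw [pvLoop]
        split_ifs at h ⊢ with h1 h2 h3
        · exact (ih (pvLowIdx v w0 st)).1 st2 h
        · exact (ih st).1 st2 h
        · cases h
        · exact (ih st).1 st2 h
      · intro st2 w ws' h
        rw [pvScan] at h
        rw [pvLoop]
        split_ifs at h ⊢ with h1 h2 h3
        · obtain ⟨a, b, c, d⟩ := (ih (pvLowIdx v w0 st)).2 st2 w ws' h
          exact ⟨a, b, by simpa using Nat.lt_succ_of_lt c, d⟩
        · obtain ⟨a, b, c, d⟩ := (ih st).2 st2 w ws' h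
          exact ⟨a, b, by simpa using Nat.lt_succ_of_lt c, d⟩
        · cases h
          refine ⟨by simpa using h1, by simpa using h2, by simp, rfl⟩
        · obtain ⟨a, b, c, d⟩ := (ih st).2 st2 w ws' h
          exact ⟨a, b, by simpa using Nat.lt_succ_of_lt c, d⟩

-- ---- one-step unfolding of A's machine ----
theorem pv_runA_nil (graph : List (String × List String)) (node_set : List String) (sl : PySem.Set String)
    (f : Nat) (st : PvSt) : pvRunA graph node_set sl f [] st = some st := by
  cases f <;> rfl

theorem pv_runA_enter (graph : List (String × List String)) (node_set : List String) (sl : PySem.Set String)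
    (f : Nat) (v : String) (c : Option String) (ws : List String)
    (rest : List (Nat × String × Option String × List String)) (st : PvSt) :
    pvRunA graph node_set sl (f+1) ((0, v, c, ws) :: rest) st
      = pvRunA graph node_set sl f ((1, v, none, ws) :: rest) (pvEnter v st) := rfl

theorem pv_runA_process (graph : List (String × List String)) (node_set : List String) (sl : PySem.Set String)
    (f : Nat) (v : String) (c : Option String) (ws : List String)
    (rest : List (Nat × String × Option String × List String)) (st : PvSt) :
    pvRunA graph node_set sl (f+1) ((1, v, c, ws) :: rest) st
      = (match pvScan node_set v ws (pvApplyC v c st) with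
         | (st2, none) => pvRunA graph node_set sl f ((2, v, none, ([] : List String)) :: rest) st2
         | (st2, some (w, ws')) =>
             pvRunA graph node_set sl f
               ((0, w, none, pvChildren graph w) :: (1, v, some w, ws') :: rest) st2) := rfl

-- ---- the simulation: a successful B-recursion is exactly a machine segment ----
theorem pv_siml (graph : List (String × List String)) (node_set : List String) (sl : PySem.Set String)
    (cand : List String) (hnd : cand.Nodup) (hns : ∀ w, node_set.contains w = true → w ∈ cand) (f : Nat)
    (hsim : ∀ v st st', pvSconnect graph node_set sl f v st = some st' → v ∈ cand →
        st.index.contains v = false →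
      ∀ rest g r, pvRunA graph node_set sl g rest st' = some r →
        pvRunA graph node_set sl (g + 4 * (pvBc cand st - pvBc cand st') - 1)
          ((0, v, none, pvChildren graph v) :: rest) st = some r) :
    ∀ (n : Nat) (ws : List String), ws.length ≤ n → ∀ (v : String) (c : Option String) (st stL : PvSt),
      pvLoop graph node_set sl f v ws (pvApplyC v c st) = some stL →
      ∀ rest g r, pvRunA graph node_set sl g rest (pvFinish sl v stL) = some r →
        pvRunA graph node_set sl (g + 2 + 4 * (pvBc cand (pvApplyC v c st) - pvBc cand stL))
          ((1, v, c, ws) :: rest) st = some r := by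
  intro n
  induction n using Nat.strong_induction_on with
  | _ n ih =>
  intro ws hlen v c st stL hloop rest g r hcont
  obtain ⟨hsc1, hsc2⟩ := pv_scan_loop graph node_set sl f v ws (pvApplyC v c st)
  cases hscan : pvScan node_set v ws (pvApplyC v c st) with
  | mk st2 o =>
  have hidx2 : st2.index = (pvApplyC v c st).index := by
    have h0 := pv_index_scan node_set v ws (pvApplyC v c st)
    rw [hscan] at h0
    exact h0
  cases o with
  | none =>
      have hl := hsc1 st2 hscan
      rw [hl] at hloop
      have hstL : st2 = stL := by cases hloop; rfl
      subst hstL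
      have hBeq : pvBc cand (pvApplyC v c st) = pvBc cand st2 := by
        unfold pvBc; rw [hidx2]
      have hE : g + 2 + 4 * (pvBc cand (pvApplyC v c st) - pvBc cand st2) = (g + 1) + 1 := by omega
      rw [hE, pv_runA_process, hscan]
      exact hcont
  | some p =>
      obtain ⟨w, ws'⟩ := p
      obtain ⟨hw1, hw2, hlt, heq⟩ := hsc2 st2 w ws' hscan
      rw [heq] at hloop
      cases hscW : pvSconnect graph node_set sl f w st2 with
      | none => rw [hscW] at hloop; cases hloop
      | some stW =>
          rw [hscW] at hloop
          -- hloop : pvLoop f v ws' (pvAfterChild v w stW) = some stL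
          have hBc2 : pvBc cand st2 = pvBc cand (pvApplyC v c st) := by
            unfold pvBc; rw [hidx2]
          obtain ⟨mono, hwW⟩ := pv_kg graph node_set sl f w st2 stW hscW
          have hwc : w ∈ cand := hns w hw1
          have hdec : pvBc cand stW + 1 ≤ pvBc cand st2 :=
            pv_filt_strict cand hnd w hwc st2.index stW.index mono hw2 hwW
          have hmonoL : pvBc cand stL ≤ pvBc cand stW := by
            have hm := pv_kg_loop graph node_set sl f (pv_kg graph node_set sl f) ws' v
              (pvAfterChild v w stW) stL hloop
            exact pv_filt_mono cand stW.index stL.index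
              (fun x hx => hm x (by rw [pv_index_afterChild]; exact hx))
          have hlt' : ws'.length < n := Nat.lt_of_lt_of_le hlt hlen
          have HIH := ih ws'.length hlt' ws' (Nat.le_refl _) v (some w) stW stL hloop
            rest g r hcont
          -- HIH : pvRunA (g + 2 + 4*(pvBc (pvAfterChild v w stW) − pvBc stL)) ((1,v,some w,ws')::rest) stW = some r
          have HA := hsim w st2 stW hscW hwc hw2 ((1, v, some w, ws') :: rest)
            (g + 2 + 4 * (pvBc cand (pvApplyC v (some w) stW) - pvBc cand stL)) r HIH
          have hBU : pvBc cand (pvApplyC v (some w) stW) = pvBc cand stW := rfl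
          have hE : g + 2 + 4 * (pvBc cand (pvApplyC v c st) - pvBc cand stL)
              = (g + 1 + 4 * (pvBc cand (pvApplyC v c st) - pvBc cand stL)) + 1 := by omega
          rw [hE, pv_runA_process, hscan]
          have harith : g + 1 + 4 * (pvBc cand (pvApplyC v c st) - pvBc cand stL)
              = g + 2 + 4 * (pvBc cand (pvApplyC v (some w) stW) - pvBc cand stL)
                  + 4 * (pvBc cand st2 - pvBc cand stW) - 1 := by
            rw [hBU]; omega
          rw [harith]
          exact HA

theorem pv_sim (graph : List (String × List String)) (node_set : List String) (sl : PySem.Set String)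
    (cand : List String) (hnd : cand.Nodup) (hns : ∀ w, node_set.contains w = true → w ∈ cand) : ∀ (f : Nat),
    ∀ v st st', pvSconnect graph node_set sl f v st = some st' → v ∈ cand → st.index.contains v = false →
      ∀ rest g r, pvRunA graph node_set sl g rest st' = some r →
        pvRunA graph node_set sl (g + 4 * (pvBc cand st - pvBc cand st') - 1)
          ((0, v, none, pvChildren graph v) :: rest) st = some r := by
  intro f
  induction f with
  | zero => intro v st st' h; rw [pvSconnect] at h; cases h
  | succ f ih =>
      intro v st st' h hv hc rest g r hcont
      rw [pvSconnect] at h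
      cases hl : pvLoop graph node_set sl f v (pvChildren graph v) (pvEnter v st) with
      | none => rw [hl] at h; cases h
      | some st2 =>
          rw [hl] at h
          have hst' : st' = pvFinish sl v st2 := by cases h; rfl
          subst hst'
          have hBe := pv_Bc_enter cand hnd v hv st hc
          have hBL : pvBc cand (pvFinish sl v st2) = pvBc cand st2 := by
            unfold pvBc; rw [pv_index_finish]
          have hmono2 : pvBc cand st2 ≤ pvBc cand (pvEnter v st) := by
            have hm := pv_kg_loop graph node_set sl f (pv_kg graph node_set sl f)
              (pvChildren graph v) v (pvEnter v st) st2 hl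
            exact pv_filt_mono cand (pvEnter v st).index st2.index hm
          have hE : g + 4 * (pvBc cand st - pvBc cand (pvFinish sl v st2)) - 1
              = (g + 4 * (pvBc cand st - pvBc cand (pvFinish sl v st2)) - 2) + 1 := by omega
          rw [hE, pv_runA_enter]
          have HIH := pv_siml graph node_set sl cand hnd hns f ih (pvChildren graph v).length
            (pvChildren graph v) (Nat.le_refl _) v none (pvEnter v st) st2 hl rest g r hcont
          have harith : g + 4 * (pvBc cand st - pvBc cand (pvFinish sl v st2)) - 2
              = g + 2 + 4 * (pvBc cand (pvApplyC v none (pvEnter v st)) - pvBc cand st2) := by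
            have hBU : pvBc cand (pvApplyC v none (pvEnter v st)) = pvBc cand (pvEnter v st) := rfl
            rw [hBU]; omega
          rw [harith]
          exact HIH

-- ---- the self-loop set: A's loop equals B's comprehension ----
theorem pv_sl_fold (p : String → Bool) : ∀ (l : List String) (s : PySem.Set String),
    l.foldl (fun s v => if p v then PySem.Set.add s v else s) s = PySem.Set.update s (l.filter p) := by
  intro l
  induction l with
  | nil => intro s; rfl
  | cons a l ih =>
      intro s
      rw [List.filter_cons]
      by_cases hp : p a = true
      · rw [if_pos hp, List.foldl_cons, if_pos hp, ih, PySem.Set.update_cons]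
      · have hp0 : p a = false := by simpa using hp
        rw [if_neg (by simp [hp0]), List.foldl_cons, if_neg (by simp [hp0]), ih]

-- ---- per-root equality of the two wrappers' fold steps ----
theorem pv_root (graph : List (String × List String)) (node_set : List String) (sl : PySem.Set String)
    (cand : List String) (hnd : cand.Nodup) (hns : ∀ w, node_set.contains w = true → w ∈ cand)
    (st : PvSt) (root : String) (hroot : root ∈ cand) :
    (if st.index.contains root then st
     else match pvRunA graph node_set sl (4 * cand.length + 4)
            [(0, root, none, pvChildren graph root)] st with
          | some st' => st'
          | none => st)
    = (if st.index.contains root then st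
       else match pvSconnect graph node_set sl (cand.length + 1) root st with
            | some st' => st'
            | none => st) := by
  by_cases hc : st.index.contains root = true
  · rw [if_pos hc, if_pos hc]
  · have hc0 : st.index.contains root = false := by simpa using hc
    have hBle : pvBc cand st ≤ cand.length := List.length_filter_le _ _
    obtain ⟨st', hB⟩ := pv_tb graph node_set sl cand hnd hns (cand.length + 1) root st hroot hc0
      (by omega)
    obtain ⟨mono, hcw⟩ := pv_kg graph node_set sl (cand.length + 1) root st st' hB
    have hdec : pvBc cand st' + 1 ≤ pvBc cand st :=
      pv_filt_strict cand hnd root hroot st.index st'.index mono hc0 hcw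
    have HA := pv_sim graph node_set sl cand hnd hns (cand.length + 1) root st st' hB hroot hc0 []
      (4 * cand.length + 4 - (4 * (pvBc cand st - pvBc cand st') - 1)) st'
      (pv_runA_nil graph node_set sl _ st')
    have hfuel : 4 * cand.length + 4 - (4 * (pvBc cand st - pvBc cand st') - 1)
        + 4 * (pvBc cand st - pvBc cand st') - 1 = 4 * cand.length + 4 := by omega
    rw [hfuel] at HA
    rw [if_neg hc, if_neg hc, HA, hB]

-- ===== VERDICT (by name: the statement is the Claim_ definition above) =====
theorem find_cycle_nodes_tarjan_py_spec : Claim_equal_find_cycle_nodes_tarjan_py := by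
  intro all_nodes graph node_set _
  unfold Spec_find_cycle_nodes_tarjan_py
  unfold find_cycle_nodes_tarjan_py find_cycle_nodes_tarjan_py_alt
  dsimp only
  have hsl : all_nodes.foldl
      (fun s v => if ((PySem.Dict.mk graph).getD v []).contains v then PySem.Set.add s v else s)
      PySem.Set.empty
      = PySem.Set.ofList (all_nodes.filter (fun v => ((PySem.Dict.mk graph).getD v []).contains v)) := by
    rw [pv_sl_fold (fun v => ((PySem.Dict.mk graph).getD v []).contains v) all_nodes PySem.Set.empty]
    exact PySem.Set.update_nil_left _
  rw [hsl]
  have hnd := PySem.List.nodup_dedup (all_nodes ++ node_set)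
  have hns : ∀ w, node_set.contains w = true → w ∈ PySem.List.dedup (all_nodes ++ node_set) := by
    intro w hw
    rw [PySem.List.mem_dedup]
    exact List.mem_append_right _ (List.contains_iff_mem.mp hw)
  have hfold := PySem.List.foldl_congr_mem all_nodes
    (fun st root =>
      if st.index.contains root then st
      else match pvRunA graph node_set
            (PySem.Set.ofList (all_nodes.filter (fun v => ((PySem.Dict.mk graph).getD v []).contains v)))
            (4 * (PySem.List.dedup (all_nodes ++ node_set)).length + 4)
            [(0, root, none, pvChildren graph root)] st with
          | some st' => st'
          | none => st)
    (fun st root =>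
      if st.index.contains root then st
      else match pvSconnect graph node_set
            (PySem.Set.ofList (all_nodes.filter (fun v => ((PySem.Dict.mk graph).getD v []).contains v)))
            ((PySem.List.dedup (all_nodes ++ node_set)).length + 1) root st with
          | some st' => st'
          | none => st)
    ⟨0, PySem.Dict.empty, PySem.Dict.empty, PySem.Set.empty, [], PySem.Set.empty⟩
    (fun st root hroot =>
      pv_root graph node_set _ (PySem.List.dedup (all_nodes ++ node_set)) hnd hns st root
        (by rw [PySem.List.mem_dedup]; exact List.mem_append_left _ hroot))
  rw [hfold]
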